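-- pv_equiv track=rewrite | github.com/tvarovski/JMcT | jmct/nbinom.py | findPotentialClusteredMutations
-- ===== SOURCE A (Python) =====
-- def findPotentialClusteredMutations(
--         mutation_list: list,
--         max_distance_between_mutations: int = 10000
--         ) -> list[list]:
--     """
--     Splits a list of mutations into sublists where the distance between two mutations is less than or equal to a given maximum distance.
--     Sublists with less than 2 elements are discarded since 1 mutation cannot form a cluster.
--
--     Args:
--         mutation_list (list): A list of mutations to split into sublists.
--         max_distance_between_mutations (int): The maximum distance between two mutations to include them in the same sublist. Defaults to 10000.
--
--     Returns:
--         list[list]: A list of sublists, where each sublist contains mutations that are within the maximum distance of each other.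
--         Sublists with less than 2 elements are discarded.
--     """
--     potential_clusters = []
--     #go through the mutation list and split it into sublists at the points where the distance between two mutations is greater than max_distance_between_mutations
--     #start with the second mutation in the list and calculate the distance between it and the previous mutation
--     #if the distance is smaller than max_distance_between_mutations, add both mutations to the current sublist and continue to the next mutation
--     #if the distance is greater than max_distance_between_mutations, close the current sublist and start a new one, then continue to the next mutation
--
--     current_sublist = [mutation_list[0]]
--
--     # Below replaced with further for efficiency
--     # for i in range(1, len(mutation_list)):
--
--     #     if mutation_list[i] - mutation_list[i-1] <= max_distance_between_mutations:
--     #         current_sublist.append(mutation_list[i])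
--     #     else:
--     #         potential_clusters.append(current_sublist)
--     #         current_sublist = []
--     #         current_sublist.append(mutation_list[i])
--
--     # potential_clusters.append(current_sublist)
--
--     # #go through the list of sublists and remove all sublists that have less than 2 elements
--     # potential_clusters = [x for x in potential_clusters if len(x) >= 2]
--
--     for i in range(1, len(mutation_list)):
--         if mutation_list[i] - mutation_list[i-1] <= max_distance_between_mutations:
--             current_sublist.append(mutation_list[i])
--         else:
--             if len(current_sublist) >= 2:
--                 potential_clusters.append(current_sublist)
--             current_sublist = [mutation_list[i]]
--
--     if len(current_sublist) >= 2:
--         potential_clusters.append(current_sublist)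
--
--
--     return potential_clusters
-- ===== SOURCE B (Python) =====
-- def findPotentialClusteredMutations(
--         mutation_list: list,
--         max_distance_between_mutations: int = 10000
--         ) -> list:
--     n = len(mutation_list)
--     breaks = [i for i in range(1, n)
--               if mutation_list[i] - mutation_list[i - 1] > max_distance_between_mutations]
--     bounds = [0] + breaks + [n]
--     segments = [mutation_list[a:b] for a, b in zip(bounds, bounds[1:])]
--     return [seg for seg in segments if len(seg) >= 2]
-- ===== Notes on version B (the rewrite author's own statement) =====
-- stated objective: alternative
-- what changed: A builds clusters in one stateful pass keeping a current sublist and flushing it at each gap; B instead computes the list of break indices, slices the input between successive boundaries, and filters out singleton segments.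
-- outside the precondition, e.g. on findPotentialClusteredMutations([], 10000): A raises IndexError, B returns []
-- crash fix: On the empty list A raises IndexError (it indexes mutation_list[0]); B naturally returns []. — e.g. on findPotentialClusteredMutations([], 10000): A raises IndexError, B returns []
import Mathlib
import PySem

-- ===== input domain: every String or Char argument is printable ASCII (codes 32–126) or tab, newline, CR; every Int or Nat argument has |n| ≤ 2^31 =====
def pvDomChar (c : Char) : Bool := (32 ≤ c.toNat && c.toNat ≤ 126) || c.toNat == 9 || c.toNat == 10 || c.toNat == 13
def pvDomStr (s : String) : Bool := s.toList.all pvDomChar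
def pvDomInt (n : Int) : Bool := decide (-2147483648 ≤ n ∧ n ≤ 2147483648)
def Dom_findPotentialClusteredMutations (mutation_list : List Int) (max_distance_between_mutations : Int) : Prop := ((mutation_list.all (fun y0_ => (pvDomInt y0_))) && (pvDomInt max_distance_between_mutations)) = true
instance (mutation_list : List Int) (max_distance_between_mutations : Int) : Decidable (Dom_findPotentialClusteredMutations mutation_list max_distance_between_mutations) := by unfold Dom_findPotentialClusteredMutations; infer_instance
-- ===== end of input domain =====

-- B replaces A's stateful accumulate-and-flush pass by computing break indices, slicing the list
-- between successive boundaries and filtering short segments (objective: alternative decomposition).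


-- ===== PORT A =====
-- loop body of A's for-loop (state = (potential_clusters, current_sublist))
def pvStepA (ml : List Int) (d : Int) (st : List (List Int) × List Int) (i : Int) : List (List Int) × List Int :=
  if PySem.List.pyGetD ml i 0 - PySem.List.pyGetD ml (i - 1) 0 ≤ d then
    (st.1, st.2 ++ [PySem.List.pyGetD ml i 0])
  else if 2 ≤ st.2.length then
    (st.1 ++ [st.2], [PySem.List.pyGetD ml i 0])
  else
    (st.1, [PySem.List.pyGetD ml i 0])

-- final 'if len(current_sublist) >= 2: potential_clusters.append(current_sublist)'
def pvFinish (st : List (List Int) × List Int) : List (List Int) :=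
  if 2 ≤ st.2.length then st.1 ++ [st.2] else st.1

def findPotentialClusteredMutations (mutation_list : List Int) (max_distance_between_mutations : Int) : List (List Int) :=
  pvFinish ((PySem.List.pyRange 1 (mutation_list.length : Int) 1).foldl
    (pvStepA mutation_list max_distance_between_mutations)
    ([], [PySem.List.pyGetD mutation_list 0 0]))

-- ===== PORT B =====
def findPotentialClusteredMutations_alt (mutation_list : List Int) (max_distance_between_mutations : Int) : List (List Int) :=
  let n : Int := (mutation_list.length : Int)
  let breaks := (PySem.List.pyRange 1 n 1).filter
      (fun i => decide (max_distance_between_mutations <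
        PySem.List.pyGetD mutation_list i 0 - PySem.List.pyGetD mutation_list (i - 1) 0))
  let bounds := [0] ++ breaks ++ [n]
  let segments := (bounds.zip bounds.tail).map
      (fun p => PySem.List.slice mutation_list (some p.1) (some p.2))
  segments.filter (fun seg => decide (2 ≤ seg.length))

-- ===== PRECONDITION & SPEC =====
-- Pre_ excludes only the empty list, on which A raises IndexError (mutation_list[0]).
def Pre_findPotentialClusteredMutations (mutation_list : List Int) (max_distance_between_mutations : Int) : Prop := mutation_list ≠ []
instance (mutation_list : List Int) (max_distance_between_mutations : Int) : Decidable (Pre_findPotentialClusteredMutations mutation_list max_distance_between_mutations) := by unfold Pre_findPotentialClusteredMutations; infer_instance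

def pvWitness_findPotentialClusteredMutations : List Int × Int := ([0, 5, 20000, 20005], 10000)

-- On the empty list A raises IndexError (it indexes mutation_list[0]); B naturally returns [].
def Raises_findPotentialClusteredMutations (mutation_list : List Int) (max_distance_between_mutations : Int) : Prop := mutation_list = []
instance (mutation_list : List Int) (max_distance_between_mutations : Int) : Decidable (Raises_findPotentialClusteredMutations mutation_list max_distance_between_mutations) := by unfold Raises_findPotentialClusteredMutations; infer_instance
def pvRaiseWitness_findPotentialClusteredMutations : List Int × Int := ([], 10000)
def pvRaiseWitnessOut_findPotentialClusteredMutations : List (List Int) := []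

def Spec_findPotentialClusteredMutations (mutation_list : List Int) (max_distance_between_mutations : Int) (out : List (List Int)) : Prop := out = findPotentialClusteredMutations_alt mutation_list max_distance_between_mutations
instance (mutation_list : List Int) (max_distance_between_mutations : Int) (out : List (List Int)) : Decidable (Spec_findPotentialClusteredMutations mutation_list max_distance_between_mutations out) := by unfold Spec_findPotentialClusteredMutations; infer_instance

-- ===== CLAIM (what is proved, stated in full; the proofs are below) =====
def Claim_equal_findPotentialClusteredMutations : Prop := ∀ (mutation_list : List Int) (max_distance_between_mutations : Int), Dom_findPotentialClusteredMutations mutation_list max_distance_between_mutations → Pre_findPotentialClusteredMutations mutation_list max_distance_between_mutations → Spec_findPotentialClusteredMutations mutation_list max_distance_between_mutations (findPotentialClusteredMutations mutation_list max_distance_between_mutations)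
def Claim_raises_findPotentialClusteredMutations : Prop := (∀ (mutation_list : List Int) (max_distance_between_mutations : Int), Dom_findPotentialClusteredMutations mutation_list max_distance_between_mutations → Raises_findPotentialClusteredMutations mutation_list max_distance_between_mutations → ¬ Pre_findPotentialClusteredMutations mutation_list max_distance_between_mutations) ∧ (Dom_findPotentialClusteredMutations (pvRaiseWitness_findPotentialClusteredMutations.1) (pvRaiseWitness_findPotentialClusteredMutations.2) ∧ Raises_findPotentialClusteredMutations (pvRaiseWitness_findPotentialClusteredMutations.1) (pvRaiseWitness_findPotentialClusteredMutations.2) ∧ findPotentialClusteredMutations_alt (pvRaiseWitness_findPotentialClusteredMutations.1) (pvRaiseWitness_findPotentialClusteredMutations.2) = pvRaiseWitnessOut_findPotentialClusteredMutations)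

-- ===== LEMMAS AND PROOFS =====

-- the common specification: cluster the tail structurally, carrying the previous element and the open cluster
def pvChunks (d : Int) : Int → List Int → List Int → List (List Int)
  | _, cur, [] => [cur]
  | prev, cur, x :: xs =>
      if x - prev ≤ d then pvChunks d x (cur ++ [x]) xs
      else cur :: pvChunks d x [x] xs

-- slices between successive bounds
def pvSegs (full : List Int) : List Int → List (List Int)
  | a :: b :: r => PySem.List.slice full (some a) (some b) :: pvSegs full (b :: r)
  | _ => []

lemma pv_zip_map_slice (full : List Int) : ∀ (bounds : List Int),
    (bounds.zip bounds.tail).map (fun p => PySem.List.slice full (some p.1) (some p.2))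
      = pvSegs full bounds
  | [] => rfl
  | [_] => rfl
  | a :: b :: r => by
      have ih := pv_zip_map_slice full (b :: r)
      simp only [List.tail_cons, List.zip_cons_cons, List.map_cons, pvSegs] at *
      rw [ih]

lemma pv_foldA_eq (ml : List Int) (d : Int) :
    ∀ (k j : Nat), j + k = ml.length → 1 ≤ j →
    ∀ (acc : List (List Int)) (cur : List Int),
    pvFinish ((PySem.List.pyRange (j : Int) (ml.length : Int) 1).foldl (pvStepA ml d) (acc, cur))
      = acc ++ (pvChunks d (ml.getD (j - 1) 0) cur (ml.drop j)).filter (fun c => decide (2 ≤ c.length)) := by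
  intro k
  induction k with
  | zero =>
    intro j hlen hj acc cur
    have hj' : j = ml.length := by omega
    have hji : ((j : Nat) : Int) = (ml.length : Int) := by exact_mod_cast hj'
    rw [hji, PySem.List.pyRange_one_eq_nil (le_refl _), hj', List.drop_length]
    by_cases h : 2 ≤ cur.length <;> simp [pvFinish, pvChunks, h]
  | succ k ih =>
    intro j hlen hj acc cur
    have hjlt : j < ml.length := by omega
    have hcons : PySem.List.pyRange (j : Int) (ml.length : Int) 1
        = (j : Int) :: PySem.List.pyRange ((j : Int) + 1) (ml.length : Int) 1 :=
      PySem.List.pyRange_one_cons (by exact_mod_cast hjlt)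
    have hj1 : ((j : Int) + 1) = (((j + 1 : Nat)) : Int) := by push_cast; ring
    have hx : PySem.List.pyGetD ml (j : Int) 0 = ml.getD j 0 := PySem.List.pyGetD_natCast ml j 0
    have hxm : PySem.List.pyGetD ml ((j : Int) - 1) 0 = ml.getD (j - 1) 0 := by
      have h1 : ((j : Int) - 1) = (((j - 1 : Nat)) : Int) := by omega
      rw [h1, PySem.List.pyGetD_natCast]
    have hdrop : ml.drop j = ml[j] :: ml.drop (j + 1) := List.drop_eq_getElem_cons hjlt
    have hgetd : ml.getD j 0 = ml[j] := List.getD_eq_getElem ml 0 hjlt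
    rw [hcons, List.foldl_cons, hdrop]
    by_cases hgap : ml[j] - ml.getD (j - 1) 0 ≤ d
    · have hstep : pvStepA ml d (acc, cur) (j : Int) = (acc, cur ++ [ml[j]]) := by
        simp only [pvStepA, hx, hxm, hgetd, if_pos hgap]
      rw [hstep, hj1, ih (j + 1) (by omega) (by omega)]
      simp only [Nat.add_sub_cancel, hgetd, pvChunks, if_pos hgap]
    · have hchunks : pvChunks d (ml.getD (j - 1) 0) cur (ml[j] :: ml.drop (j + 1))
          = cur :: pvChunks d ml[j] [ml[j]] (ml.drop (j + 1)) := by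
        simp only [pvChunks, if_neg hgap]
      by_cases hc : 2 ≤ cur.length
      · have hstep : pvStepA ml d (acc, cur) (j : Int) = (acc ++ [cur], [ml[j]]) := by
          simp only [pvStepA, hx, hxm, hgetd, if_neg hgap, if_pos hc]
        rw [hstep, hj1, ih (j + 1) (by omega) (by omega), hchunks]
        simp only [Nat.add_sub_cancel, hgetd, List.filter_cons, decide_eq_true_eq, if_pos hc,
          List.append_assoc, List.singleton_append]
      · have hstep : pvStepA ml d (acc, cur) (j : Int) = (acc, [ml[j]]) := by
          simp only [pvStepA, hx, hxm, hgetd, if_neg hgap, if_neg hc]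
        rw [hstep, hj1, ih (j + 1) (by omega) (by omega), hchunks]
        simp only [Nat.add_sub_cancel, hgetd, List.filter_cons, decide_eq_true_eq, if_neg hc]

lemma pv_segs_eq (ml : List Int) (d : Int) :
    ∀ (k j : Nat), j + k = ml.length → 1 ≤ j →
    ∀ (a : Nat), a ≤ j - 1 →
    pvSegs ml (((a : Nat) : Int) :: ((PySem.List.pyRange (j : Int) (ml.length : Int) 1).filter
        (fun i => decide (d < PySem.List.pyGetD ml i 0 - PySem.List.pyGetD ml (i - 1) 0)) ++ [(ml.length : Int)]))
      = pvChunks d (ml.getD (j - 1) 0) ((ml.drop a).take (j - a)) (ml.drop j) := by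
  intro k
  induction k with
  | zero =>
    intro j hlen hj a ha
    have hj' : j = ml.length := by omega
    have hji : ((j : Nat) : Int) = (ml.length : Int) := by exact_mod_cast hj'
    rw [hji, PySem.List.pyRange_one_eq_nil (le_refl _), hj', List.drop_length]
    simp only [List.filter_nil, List.nil_append, pvSegs, PySem.List.slice_natCast, pvChunks]
  | succ k ih =>
    intro j hlen hj a ha
    have hjlt : j < ml.length := by omega
    have hcons : PySem.List.pyRange (j : Int) (ml.length : Int) 1
        = (j : Int) :: PySem.List.pyRange ((j : Int) + 1) (ml.length : Int) 1 :=
      PySem.List.pyRange_one_cons (by exact_mod_cast hjlt)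
    have hj1 : ((j : Int) + 1) = (((j + 1 : Nat)) : Int) := by push_cast; ring
    have hx : PySem.List.pyGetD ml (j : Int) 0 = ml.getD j 0 := PySem.List.pyGetD_natCast ml j 0
    have hxm : PySem.List.pyGetD ml ((j : Int) - 1) 0 = ml.getD (j - 1) 0 := by
      have h1 : ((j : Int) - 1) = (((j - 1 : Nat)) : Int) := by omega
      rw [h1, PySem.List.pyGetD_natCast]
    have hdrop : ml.drop j = ml[j] :: ml.drop (j + 1) := List.drop_eq_getElem_cons hjlt
    have hgetd : ml.getD j 0 = ml[j] := List.getD_eq_getElem ml 0 hjlt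
    rw [hcons, List.filter_cons, hdrop]
    simp only [hx, hxm, hgetd, decide_eq_true_eq]
    by_cases hgap : ml[j] - ml.getD (j - 1) 0 ≤ d
    · rw [if_neg (not_lt.mpr hgap), hj1, ih (j + 1) (by omega) (by omega) a (by omega)]
      have htake : (ml.drop a).take (j + 1 - a) = (ml.drop a).take (j - a) ++ [ml[j]] := by
        have h2 : j + 1 - a = (j - a) + 1 := by omega
        have h3 : (ml.drop a)[j - a]? = some ml[j] := by
          rw [List.getElem?_drop]
          have h4 : a + (j - a) = j := by omega
          rw [h4, List.getElem?_eq_getElem hjlt]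
        rw [h2, List.take_add_one, h3]
        rfl
      rw [htake]
      simp only [Nat.add_sub_cancel, hgetd, pvChunks, if_pos hgap]
    · rw [if_pos (not_le.mp hgap), List.cons_append]
      have hsegs : pvSegs ml ((a : Int) :: (j : Int) ::
          ((PySem.List.pyRange ((j : Int) + 1) (ml.length : Int) 1).filter
            (fun i => decide (d < PySem.List.pyGetD ml i 0 - PySem.List.pyGetD ml (i - 1) 0)) ++ [(ml.length : Int)]))
          = PySem.List.slice ml (some (a : Int)) (some (j : Int)) ::
            pvSegs ml ((j : Int) ::
              ((PySem.List.pyRange ((j : Int) + 1) (ml.length : Int) 1).filter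
                (fun i => decide (d < PySem.List.pyGetD ml i 0 - PySem.List.pyGetD ml (i - 1) 0)) ++ [(ml.length : Int)])) := rfl
      rw [hsegs, PySem.List.slice_natCast ml a j]
      have hch : pvChunks d (ml.getD (j - 1) 0) ((ml.drop a).take (j - a)) (ml[j] :: ml.drop (j + 1))
          = ((ml.drop a).take (j - a)) :: pvChunks d ml[j] [ml[j]] (ml.drop (j + 1)) := by
        simp only [pvChunks, if_neg hgap]
      rw [hch]
      congr 1
      rw [hj1, ih (j + 1) (by omega) (by omega) j (by omega)]
      have h5 : j + 1 - j = 1 := by omega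
      rw [h5, hdrop, List.take_succ_cons, List.take_zero, Nat.add_sub_cancel, hgetd]

-- ===== VERDICT (by name: the statement is the Claim_ definition above) =====
theorem findPotentialClusteredMutations_spec : Claim_equal_findPotentialClusteredMutations := by
  intro ml d _ hpre
  unfold Spec_findPotentialClusteredMutations
  match ml, hpre with
  | h :: t, _ =>
    have hA := pv_foldA_eq (h :: t) d ((h :: t).length - 1) 1 (by simp; omega) (by omega) [] [(h :: t).getD 0 0]
    have hB := pv_segs_eq (h :: t) d ((h :: t).length - 1) 1 (by simp; omega) (by omega) 0 (by omega)
    rw [Nat.cast_one] at hA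
    rw [Nat.cast_one, Nat.cast_zero] at hB
    simp only [Nat.sub_self, Nat.sub_zero, List.drop_zero, List.getD_cons_zero,
      List.take_succ_cons, List.take_zero, List.nil_append, List.drop_one, List.tail_cons] at hA hB
    rw [findPotentialClusteredMutations, PySem.List.pyGetD_zero, List.getD_cons_zero, hA]
    simp only [findPotentialClusteredMutations_alt]
    rw [pv_zip_map_slice, List.singleton_append, List.cons_append, hB]

@[simp] theorem findPotentialClusteredMutations_raises : Claim_raises_findPotentialClusteredMutations := by
  unfold Claim_raises_findPotentialClusteredMutations
  exact ⟨fun ml d _ hr hp => hp hr, by decide⟩
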